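-- pv_equiv track=rewrite | github.com/Renyifei-0909/AliMoment | backend/app/services/query_normalizer.py | _match_alias
-- ===== SOURCE A (Python) =====
-- from typing import Dict, Optional
--
-- def _match_alias(query: str, aliases: Dict[str, str]) -> Optional[str]:
--     normalized_query = query.lower().replace(" ", "")
--     for alias, translated in aliases.items():
--         if normalized_query == alias.lower().replace(" ", ""):
--             return translated
--     for alias, translated in aliases.items():
--         compact_alias = alias.lower().replace(" ", "")
--         if compact_alias and compact_alias in normalized_query:
--             return translated
--     return None
-- ===== SOURCE B (Python) =====
-- from typing import Dict, Optional
--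
-- def _match_alias(query: str, aliases: Dict[str, str]) -> Optional[str]:
--     # Single pass: exact match returns immediately; the first substring match
--     # is remembered as a fallback and returned only after the full scan.
--     normalized_query = query.lower().replace(" ", "")
--     fallback = None
--     for alias, translated in aliases.items():
--         compact_alias = alias.lower().replace(" ", "")
--         if compact_alias == normalized_query:
--             return translated
--         if fallback is None and compact_alias and compact_alias in normalized_query:
--             fallback = translated
--     return fallback
-- ===== Notes on version B (the rewrite author's own statement) =====
-- stated objective: alternative
-- what changed: Fuses A's two sequential scans of aliases into one pass: each alias is normalized once, exact matches return immediately, and the first substring match is kept in a fallback accumulator returned after the scan.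
import Mathlib
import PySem

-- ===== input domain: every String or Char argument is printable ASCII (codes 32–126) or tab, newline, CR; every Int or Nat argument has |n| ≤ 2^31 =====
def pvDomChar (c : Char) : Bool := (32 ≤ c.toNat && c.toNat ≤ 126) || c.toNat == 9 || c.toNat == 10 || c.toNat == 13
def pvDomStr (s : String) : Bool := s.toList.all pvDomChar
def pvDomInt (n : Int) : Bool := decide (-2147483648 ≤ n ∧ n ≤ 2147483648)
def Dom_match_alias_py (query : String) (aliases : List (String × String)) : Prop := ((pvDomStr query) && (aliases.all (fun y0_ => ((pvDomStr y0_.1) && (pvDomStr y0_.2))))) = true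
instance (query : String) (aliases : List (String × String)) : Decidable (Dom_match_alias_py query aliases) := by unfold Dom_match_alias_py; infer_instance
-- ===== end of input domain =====

-- B fuses A's two sequential scans into one pass with a fallback accumulator (objective: alternative decomposition; each alias normalized once).

-- s.lower().replace(" ", "")
def pvNorm (s : String) : String := PySem.Str.replace (PySem.Str.lower s) " " ""

-- ===== PORT A =====
-- first loop of A: exact match on normalized alias
def pvScanExact (nq : String) : List (String × String) → Option String
  | [] => none
  | (a, t) :: r => if nq == pvNorm a then some t else pvScanExact nq r

-- second loop of A: non-empty compact alias occurring as a substring of the query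
def pvScanSub (nq : String) : List (String × String) → Option String
  | [] => none
  | (a, t) :: r =>
    let ca := pvNorm a
    if (!(ca == "")) && PySem.Str.isIn ca nq then some t else pvScanSub nq r

def match_alias_py (query : String) (aliases : List (String × String)) : Option String :=
  let nq := pvNorm query
  match pvScanExact nq aliases with
  | some t => some t
  | none => pvScanSub nq aliases

-- ===== PORT B =====
-- B's single loop: return on exact match, record first substring match in the fallback
def pvScanB (nq : String) (fb : Option String) : List (String × String) → Option String
  | [] => fb
  | (a, t) :: r =>
    let ca := pvNorm a
    if ca == nq then some t
    else pvScanB nq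
      (if fb.isNone && (!(ca == "")) && PySem.Str.isIn ca nq then some t else fb) r

def match_alias_py_alt (query : String) (aliases : List (String × String)) : Option String :=
  pvScanB (pvNorm query) none aliases

-- ===== PRECONDITION & SPEC =====
def Spec_match_alias_py (query : String) (aliases : List (String × String)) (out : Option String) : Prop := out = match_alias_py_alt query aliases
instance (query : String) (aliases : List (String × String)) (out : Option String) : Decidable (Spec_match_alias_py query aliases out) := by unfold Spec_match_alias_py; infer_instance

-- ===== CLAIM (what is proved, stated in full; the proofs are below) =====
def Claim_equal_match_alias_py : Prop := ∀ (query : String) (aliases : List (String × String)), Dom_match_alias_py query aliases → Spec_match_alias_py query aliases (match_alias_py query aliases)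

-- ===== LEMMAS AND PROOFS =====
-- B's fused scan equals: first exact match, else the fallback, else the first substring match.
theorem pvScanB_eq (nq : String) : ∀ (l : List (String × String)) (fb : Option String),
    pvScanB nq fb l =
      (match pvScanExact nq l with
       | some t => some t
       | none => match fb with
         | some x => some x
         | none => pvScanSub nq l)
  | [], fb => by cases fb <;> rfl
  | (a, t) :: r, fb => by
    simp only [pvScanB, pvScanExact, pvScanSub]
    by_cases h : pvNorm a = nq
    · simp [h]
    · have h1 : (pvNorm a == nq) = false := by simp [h]
      have h2 : (nq == pvNorm a) = false := by simp; exact fun e => h e.symm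
      rw [h1, h2]
      simp only [Bool.false_eq_true, if_false]
      cases fb with
      | some x => simp [pvScanB_eq nq r (some x)]
      | none =>
        by_cases hc : ((!(pvNorm a == "")) && PySem.Str.isIn (pvNorm a) nq) = true
        · simp only [Option.isNone_none, Bool.true_and, hc, if_true]
          rw [pvScanB_eq nq r (some t)]
        · simp only [Option.isNone_none, Bool.true_and, hc, Bool.false_eq_true, if_false]
          exact pvScanB_eq nq r none

-- ===== VERDICT (by name: the statement is the Claim_ definition above) =====
theorem match_alias_py_spec : Claim_equal_match_alias_py := by
  intro q al _
  unfold Spec_match_alias_py match_alias_py match_alias_py_alt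
  rw [pvScanB_eq]
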